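-- pv_equiv track=rewrite | github.com/bartongroup/PT_fertility_genomics | final_summary/FINAL_SUMMARY/make_upset_plots_venns.py | all_nonempty_intersections
-- ===== SOURCE A (Python) =====
-- from typing import Dict, Iterable, List, Sequence, Set, Tuple
--
-- def all_nonempty_intersections(
--     gene_lists: Dict[str, Set[str]],
-- ) -> List[Tuple[Tuple[str, ...], int]]:
--     """
--     Compute all non-empty exact intersections across input sets.
--
--     Returns a list of:
--         ((set_name_1, set_name_2, ...), size)
--     where the tuple indicates the exact combination of sets
--     in which the genes are present.
--     """
--     set_names = list(gene_lists.keys())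
--     all_genes = sorted(set().union(*gene_lists.values()))
--
--     pattern_counts: Dict[Tuple[str, ...], int] = {}
--
--     for gene in all_genes:
--         present_in = tuple(
--             name for name in set_names if gene in gene_lists[name]
--         )
--         if present_in:
--             pattern_counts[present_in] = (
--                 pattern_counts.get(present_in, 0) + 1
--             )
--
--     intersections = sorted(
--         pattern_counts.items(),
--         key=lambda item: item[1],
--         reverse=True,
--     )
--     return intersections
-- ===== SOURCE B (Python) =====
-- def all_nonempty_intersections(gene_lists):
--     """Inverted index: one pass over each set's members builds per-gene
--     membership patterns; no per-gene scan over all sets."""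
--     membership = {}
--     for name, genes in gene_lists.items():
--         for g in genes:
--             membership[g] = membership.get(g, ()) + (name,)
--     pattern_counts = {}
--     for g in sorted(membership):
--         pat = membership[g]
--         pattern_counts[pat] = pattern_counts.get(pat, 0) + 1
--     return sorted(pattern_counts.items(), key=lambda item: item[1], reverse=True)
-- ===== Notes on version B (the rewrite author's own statement) =====
-- stated objective: faster
-- what changed: A scans every set once per gene (membership test per (gene,set) pair); B builds an inverted index in one pass over each set's members, so each gene's pattern is read off directly, keeping the final stable count-descending sort.
import Mathlib
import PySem

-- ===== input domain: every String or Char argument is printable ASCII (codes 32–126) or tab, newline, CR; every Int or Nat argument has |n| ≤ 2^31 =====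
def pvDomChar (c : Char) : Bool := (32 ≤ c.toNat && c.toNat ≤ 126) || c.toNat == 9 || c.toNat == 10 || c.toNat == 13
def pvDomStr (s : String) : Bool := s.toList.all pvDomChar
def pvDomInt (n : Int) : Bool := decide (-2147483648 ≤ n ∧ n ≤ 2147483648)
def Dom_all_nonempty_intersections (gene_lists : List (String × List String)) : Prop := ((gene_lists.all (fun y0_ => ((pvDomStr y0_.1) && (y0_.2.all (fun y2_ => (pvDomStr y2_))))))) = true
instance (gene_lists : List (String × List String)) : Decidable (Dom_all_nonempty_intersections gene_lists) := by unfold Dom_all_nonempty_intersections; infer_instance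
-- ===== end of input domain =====

-- B replaces A's per-gene membership scan over all sets by an inverted index built
-- in one pass over each set's members (objective: faster).

-- ===== PORT A =====
-- set_names = list(gene_lists.keys()); all_genes = sorted(set().union(*gene_lists.values()));
-- then one pass over all_genes testing, for every set, membership of the gene; finally
-- a stable sort of the pattern counter's items by count, descending.
def all_nonempty_intersections (gene_lists : List (String × List String)) : List (List String × Int) :=
  let set_names := gene_lists.map (fun p => p.1)
  -- set().union(*gene_lists.values()): the distinct genes (a set; order irrelevant, it is sorted next)
  let all_genes := PySem.List.sorted (PySem.Set.ofList ((gene_lists.map (fun p => p.2)).flatten)) (fun x => x) false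
  let pattern_counts := all_genes.foldl (fun pc gene =>
      let present_in := set_names.filter
        (fun name => ((PySem.Dict.mk gene_lists).getD name []).contains gene)
      if present_in ≠ [] then pc.insert present_in (pc.getD present_in 0 + 1) else pc)
    PySem.Dict.empty
  PySem.List.sorted pattern_counts.items (fun item => item.2) true

-- ===== PORT B =====
-- inverted index: membership[g] = tuple of the names of the sets containing g, built in
-- one pass over each set's members; then count the patterns over the sorted genes and
-- sort the counter's items by count, descending (same stable sort as A).
def all_nonempty_intersections_alt (gene_lists : List (String × List String)) : List (List String × Int) :=
  let membership := gene_lists.foldl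
    (fun m p => p.2.foldl (fun m g => m.modify g [] (fun t => t ++ [p.1])) m)
    PySem.Dict.empty
  let pattern_counts := (PySem.List.sorted membership.keys (fun x => x) false).foldl
    (fun pc g =>
      let pat := membership.getD g []
      pc.insert pat (pc.getD pat 0 + 1))
    PySem.Dict.empty
  PySem.List.sorted pattern_counts.items (fun item => item.2) true

-- ===== PRECONDITION & SPEC =====
-- Pre_ only says the association list is a valid encoding of A's parameter type
-- dict[str, set[str]]: keys distinct (a Python dict cannot repeat a key) and each
-- value's elements distinct (it encodes a set). Every input the Python A accepts
-- satisfies this; only non-dict/non-set encodings are excluded.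
def Pre_all_nonempty_intersections (gene_lists : List (String × List String)) : Prop :=
  (gene_lists.map (fun p => p.1)).Nodup ∧ ∀ p ∈ gene_lists, p.2.Nodup
instance (gene_lists : List (String × List String)) : Decidable (Pre_all_nonempty_intersections gene_lists) := by unfold Pre_all_nonempty_intersections; infer_instance

def pvWitness_all_nonempty_intersections : (List (String × List String)) :=
  [("a", ["g1", "g2"]), ("b", ["g2"])]

def Spec_all_nonempty_intersections (gene_lists : List (String × List String)) (out : List (List String × Int)) : Prop := out = all_nonempty_intersections_alt gene_lists
instance (gene_lists : List (String × List String)) (out : List (List String × Int)) : Decidable (Spec_all_nonempty_intersections gene_lists out) := by unfold Spec_all_nonempty_intersections; infer_instance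

-- ===== CLAIM (what is proved, stated in full; the proofs are below) =====
def Claim_equal_all_nonempty_intersections : Prop := ∀ (gene_lists : List (String × List String)), Dom_all_nonempty_intersections gene_lists → Pre_all_nonempty_intersections gene_lists → Spec_all_nonempty_intersections gene_lists (all_nonempty_intersections gene_lists)

-- ===== LEMMAS AND PROOFS =====

-- the canonical membership pattern of a gene: names of the sets containing it, in input order
def pvPat (gene_lists : List (String × List String)) (g : String) : List String :=
  (gene_lists.filter (fun p => p.2.contains g)).map (fun p => p.1)

-- on a duplicate-free list, filtering for one element keeps at most one copy
lemma pv_filter_nodup (l : List String) (g : String) (h : l.Nodup) :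
    l.filter (· == g) = if l.contains g then [g] else [] := by
  induction l with
  | nil => simp
  | cons x t ih =>
    simp only [List.nodup_cons] at h
    by_cases hx : x = g
    · subst hx
      have hnil : List.filter (· == x) t = [] := by
        rw [List.filter_eq_nil_iff]; intro a ha; simp; rintro rfl; exact h.1 ha
      simp [hnil]
    · have hiff : (g = x ∨ g ∈ t) ↔ g ∈ t := by
        constructor
        · rintro (rfl | hh); exact absurd rfl hx; exact hh
        · exact Or.inr
      simp [hx, ih h.2, hiff]

-- B's inner loop over one set appends the set's name exactly once for a member gene
lemma pv_inner_getD (genes : List String) (name : String)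
    (m : PySem.Dict String (List String)) (hnd : genes.Nodup) (g : String) :
    (genes.foldl (fun m g' => m.modify g' [] (fun t => t ++ [name])) m).getD g []
      = m.getD g [] ++ (if genes.contains g then [name] else []) := by
  have h1 : genes.foldl (fun m g' => m.modify g' [] (fun t => t ++ [name])) m
      = (genes.map (fun g' => (g', name))).foldl
          (fun m p => m.modify p.1 [] (fun t => t ++ [p.2])) m := by
    rw [List.foldl_map]
  rw [h1, PySem.Dict.getD_foldl_modify_append]
  congr 1
  rw [List.filter_map]
  have h2 : ((fun p : String × String => p.1 == g) ∘ (fun g' => (g', name)))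
      = (fun g' => g' == g) := rfl
  rw [h2, pv_filter_nodup genes g hnd]
  split <;> simp

-- B's membership dict reads off the canonical pattern
lemma pv_membership_getD (l : List (String × List String))
    (m : PySem.Dict String (List String)) (hnd : ∀ p ∈ l, p.2.Nodup) (g : String) :
    (l.foldl (fun m p => p.2.foldl (fun m g' => m.modify g' [] (fun t => t ++ [p.1])) m) m).getD g []
      = m.getD g [] ++ pvPat l g := by
  induction l generalizing m with
  | nil => simp [pvPat]
  | cons p t ih =>
    simp only [List.foldl_cons]
    rw [ih _ (fun q hq => hnd q (List.mem_cons_of_mem _ hq)),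
        pv_inner_getD p.2 p.1 m (hnd p List.mem_cons_self) g]
    by_cases hc : g ∈ p.2 <;> simp [pvPat, hc]

-- B's membership keys are the distinct genes, in first-occurrence order
lemma pv_membership_keys (l : List (String × List String))
    (m : PySem.Dict String (List String)) :
    (l.foldl (fun m p => p.2.foldl (fun m g' => m.modify g' [] (fun t => t ++ [p.1])) m) m).keys
      = PySem.Set.update m.keys ((l.map (fun p => p.2)).flatten) := by
  induction l generalizing m with
  | nil => simp [PySem.Set.update_nil]
  | cons p t ih =>
    simp only [List.foldl_cons, List.map_cons, List.flatten_cons]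
    rw [ih, PySem.Dict.keys_foldl_modify p.2 [] (fun _ _ t => t ++ [p.1]) m,
        PySem.Set.update_append]

-- A's filter over the key list computes the same canonical pattern
lemma pv_present_in (gene_lists : List (String × List String))
    (hk : (gene_lists.map (fun p => p.1)).Nodup) (g : String) :
    (gene_lists.map (fun p => p.1)).filter
        (fun name => ((PySem.Dict.mk gene_lists).getD name []).contains g)
      = pvPat gene_lists g := by
  rw [List.filter_map]
  unfold pvPat
  congr 1
  apply List.filter_congr
  intro p hp
  have hitems : (p.1, p.2) ∈ (PySem.Dict.mk gene_lists).items := by simpa using hp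
  have hkeys : (PySem.Dict.mk gene_lists).keys.Nodup := by simpa [PySem.Dict.keys] using hk
  simp only [Function.comp]
  rw [PySem.Dict.getD_of_mem_items _ hitems hkeys]

-- ===== VERDICT (by name: the statement is the Claim_ definition above) =====
theorem all_nonempty_intersections_spec : Claim_equal_all_nonempty_intersections := by
  intro gene_lists _ hpre
  obtain ⟨hk, hv⟩ := hpre
  unfold Spec_all_nonempty_intersections
  simp only [all_nonempty_intersections, all_nonempty_intersections_alt]
  rw [pv_membership_keys gene_lists PySem.Dict.empty,
      show (PySem.Dict.empty : PySem.Dict String (List String)).keys = PySem.Set.empty from rfl,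
      PySem.Set.update_empty]
  congr 1
  congr 1
  apply PySem.List.foldl_congr_mem
  intro pc g hg
  have hgmem : g ∈ (gene_lists.map (fun p => p.2)).flatten := by
    have h1 := (PySem.List.mem_sorted _ _ _ _).mp hg
    simpa [PySem.Set.mem_ofList] using h1
  obtain ⟨lst, hlst, hgl⟩ := List.mem_flatten.mp hgmem
  obtain ⟨p, hp, rfl⟩ := List.mem_map.mp hlst
  have hne : pvPat gene_lists g ≠ [] := by
    have hmf : p ∈ gene_lists.filter (fun q => q.2.contains g) :=
      List.mem_filter.mpr ⟨hp, by simpa using hgl⟩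
    intro hnil
    unfold pvPat at hnil
    rw [List.map_eq_nil_iff] at hnil
    rw [hnil] at hmf
    simp at hmf
  rw [pv_membership_getD gene_lists PySem.Dict.empty hv g,
      show (PySem.Dict.empty : PySem.Dict String (List String)).getD g [] = [] from rfl,
      List.nil_append, pv_present_in gene_lists hk g]
  simp [hne]
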